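-- pv_equiv track=rewrite | github.com/gehuybre/geo-dash | archive/pattern_generator_v3.py | ascending_heights
-- ===== SOURCE A (Python) =====
-- def ascending_heights(start, end, count):
--     if count == 1:
--         return [start]
--     step = max(1, (end - start) // max(1, (count - 1)))
--     heights, current = [], start
--     for _ in range(count):
--         heights.append(current)
--         current = min(current + step, end)
--     return heights
-- ===== SOURCE B (Python) =====
-- def ascending_heights(start, end, count):
--     if count <= 0:
--         return []
--     step = max(1, (end - start) // max(1, count - 1))
--     # number of post-start positions that rise before hitting the cap
--     ramp = min(count - 1, max(0, (end - start) // step))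
--     return ([start]
--             + [start + i * step for i in range(1, ramp + 1)]
--             + [end] * (count - 1 - ramp))
-- ===== Notes on version B (the rewrite author's own statement) =====
-- stated objective: alternative
-- what changed: Instead of clamping each value with min inside an accumulator loop, B computes in closed form the index where the ramp hits the cap ((end-start)//step) and concatenates three segments: [start], an uncapped arithmetic ramp, and a constant tail of end repeated for the remaining positions.
import Mathlib
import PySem

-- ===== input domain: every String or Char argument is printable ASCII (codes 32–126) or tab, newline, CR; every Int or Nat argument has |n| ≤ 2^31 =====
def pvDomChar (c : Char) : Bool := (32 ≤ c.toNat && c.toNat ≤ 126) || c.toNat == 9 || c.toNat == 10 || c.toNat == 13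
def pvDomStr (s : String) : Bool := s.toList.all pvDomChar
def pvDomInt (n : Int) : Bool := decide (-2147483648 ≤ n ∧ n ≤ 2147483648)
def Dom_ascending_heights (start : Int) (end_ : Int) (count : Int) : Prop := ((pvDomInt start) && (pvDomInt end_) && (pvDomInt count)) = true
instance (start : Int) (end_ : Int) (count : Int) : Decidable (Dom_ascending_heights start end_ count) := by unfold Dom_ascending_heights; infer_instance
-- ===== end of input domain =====

-- B builds the result as three concatenated segments ([start], uncapped arithmetic ramp, constant end-tail) computed from a closed-form cap index, replacing A's min-clamped accumulator loop (alternative decomposition, same cost).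


-- ===== PORT A =====
def ascending_heights (start : Int) (end_ : Int) (count : Int) : List Int :=
  if count == 1 then [start]
  else
    let step := max 1 (PySem.Int.floordiv (end_ - start) (max 1 (count - 1)))
    ((PySem.List.pyRange 0 count 1).foldl
      (fun (st : List Int × Int) _ => (st.1 ++ [st.2], min (st.2 + step) end_))
      ([], start)).1

-- ===== PORT B =====
def ascending_heights_alt (start : Int) (end_ : Int) (count : Int) : List Int :=
  if count ≤ 0 then []
  else
    let step := max 1 (PySem.Int.floordiv (end_ - start) (max 1 (count - 1)))
    let ramp := min (count - 1) (max 0 (PySem.Int.floordiv (end_ - start) step))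
    [start]
      ++ (PySem.List.pyRange 1 (ramp + 1) 1).map (fun i => start + i * step)
      ++ List.replicate (count - 1 - ramp).toNat end_

-- ===== PRECONDITION & SPEC =====
def Spec_ascending_heights (start : Int) (end_ : Int) (count : Int) (out : List Int) : Prop := out = ascending_heights_alt start end_ count
instance (start : Int) (end_ : Int) (count : Int) (out : List Int) : Decidable (Spec_ascending_heights start end_ count out) := by unfold Spec_ascending_heights; infer_instance

-- ===== CLAIM (what is proved, stated in full; the proofs are below) =====
def Claim_equal_ascending_heights : Prop := ∀ (start : Int) (end_ : Int) (count : Int), Dom_ascending_heights start end_ count → Spec_ascending_heights start end_ count (ascending_heights start end_ count)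

-- ===== LEMMAS AND PROOFS =====

-- loop invariant for A: after n iterations the accumulator is the per-index clamped
-- closed form, and `current` equals min (start + n*step) end_ (start when n = 0)
theorem ah_loop (start end_ step : Int) (hstep : 1 ≤ step) (n : Nat) :
    ((List.range n).foldl
      (fun (st : List Int × Int) _ => (st.1 ++ [st.2], min (st.2 + step) end_))
      ([], start))
    = ((List.range n).map (fun (k : Nat) => if k = 0 then start else min (start + (k : Int) * step) end_),
       if n = 0 then start else min (start + (n : Int) * step) end_) := by
  induction n with
  | zero => simp
  | succ m ih =>
    rw [List.range_succ, List.foldl_append, ih, List.map_append]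
    simp only [List.foldl_cons, List.foldl_nil, List.map_cons, List.map_nil, Prod.mk.injEq]
    rcases Nat.eq_zero_or_pos m with h | h
    · subst h
      exact ⟨by simp, by simp⟩
    · have hm : ¬ (m = 0) := by omega
      refine ⟨by simp, ?_⟩
      simp only [if_neg hm, Nat.succ_ne_zero]
      have h1 : start + ((m : Int) + 1) * step = start + (m : Int) * step + step := by ring
      push_cast
      rw [h1]
      omega

theorem ascending_heights_spec : Claim_equal_ascending_heights := by
  intro start end_ count _
  show ascending_heights start end_ count = ascending_heights_alt start end_ count
  unfold ascending_heights ascending_heights_alt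
  set step := max 1 (PySem.Int.floordiv (end_ - start) (max 1 (count - 1))) with hstepdef
  have hstep : 1 ≤ step := le_max_left _ _
  set q := PySem.Int.floordiv (end_ - start) step with hqdef
  have hqe : q = (end_ - start) / step := by
    rw [hqdef, PySem.Int.floordiv, Int.fdiv_eq_ediv,
      if_pos (Or.inl (by omega : (0:Int) ≤ step)), Int.sub_zero]
  have hq1 : q * step ≤ end_ - start := by
    rw [hqe]; exact Int.ediv_mul_le _ (by omega)
  have hq2 : end_ - start < (q + 1) * step := by
    rw [hqe]; exact Int.lt_ediv_add_one_mul_self _ (by omega)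
  set r := min (count - 1) (max 0 q) with hrdef
  by_cases hcpos : count ≤ 0
  · have h0 : count.toNat = 0 := by omega
    have hc1 : (count == 1) = false := by simp; omega
    simp only [hcpos, if_true, hc1, Bool.false_eq_true, if_false,
      PySem.List.pyRange_one, Int.sub_zero, List.foldl_map, h0, List.range_zero,
      List.foldl_nil]
  · have hr0 : 0 ≤ r := by rw [hrdef]; omega
    have hrc : r ≤ count - 1 := min_le_left _ _
    simp only [hcpos, if_false]
    by_cases hc : count == 1
    · have hc1 : count = 1 := by simpa using hc
      subst hc1
      simp [PySem.List.pyRange_one_eq_nil]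
    · have hc2 : 2 ≤ count := by simp at hc; omega
      simp only [hc, Bool.false_eq_true, if_false]
      rw [← hqdef, ← hrdef]
      rw [PySem.List.pyRange_one]
      simp only [Int.sub_zero, List.foldl_map]
      rw [ah_loop start end_ step hstep count.toNat]
      simp only
      apply List.ext_getElem
      · simp only [List.length_append, List.length_cons, List.length_nil, List.length_map,
          List.length_range, List.length_replicate, PySem.List.length_pyRange_one]
        omega
      · intro j hj1 hj2
        simp only [List.getElem_map, List.getElem_range]
        have hjn : j < count.toNat := by simpa using hj1
        by_cases hj0 : j = 0
        · subst hj0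
          simp
        · simp only [if_neg hj0]
          by_cases hjr : (j : Int) ≤ r
          · -- inside the ramp
            rw [List.getElem_append_left (by
              simp only [List.length_append, List.length_cons, List.length_nil,
                List.length_map, PySem.List.length_pyRange_one]
              omega)]
            rw [List.getElem_append_right (by
              simp only [List.length_cons, List.length_nil]
              omega)]
            simp only [List.getElem_map, PySem.List.getElem_pyRange_one, List.length_cons,
              List.length_nil]
            have hmin : start + (j : Int) * step ≤ end_ := by
              have hq0 : 1 ≤ q := by
                by_contra h
                have : r ≤ 0 := by rw [hrdef]; omega
                omega
              have hjq : (j : Int) ≤ q := by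
                have : r ≤ q := by rw [hrdef]; omega
                omega
              have : (j : Int) * step ≤ q * step :=
                mul_le_mul_of_nonneg_right hjq (by omega)
              omega
            rw [min_eq_left hmin]
            have hj' : (1 + ((j - (0 + 1) : Nat) : Int)) = (j : Int) := by omega
            rw [hj']
          · -- capped tail: every later position equals end_
            rw [List.getElem_append_right (by
              simp only [List.length_append, List.length_cons, List.length_nil,
                List.length_map, PySem.List.length_pyRange_one]
              omega)]
            rw [List.getElem_replicate]
            have hrq : q ≤ r := by
              have hjc : (j : Int) ≤ count - 1 := by omega
              rw [hrdef]
              rcases le_total (count - 1) (max 0 q) with h | h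
              · omega
              · omega
            have hmin : end_ ≤ start + (j : Int) * step := by
              have hjq1 : q + 1 ≤ (j : Int) := by omega
              have : (q + 1) * step ≤ (j : Int) * step :=
                mul_le_mul_of_nonneg_right hjq1 (by omega)
              omega
            rw [min_eq_right hmin]
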